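-- pv_equiv track=rewrite | github.com/Dies-Das/meta-BAMPD-data | analysis/analyze_RT_M_SR_copy_stakes.py | states_by_steps_left
-- ===== SOURCE A (Python) =====
-- import itertools
--
-- def states_by_steps_left(T: int):
--     states = [[] for _ in range(T + 1)]
--     for n in range(T + 1):
--         s_left = T - n
--         for s1, f1, s2 in itertools.product(range(n + 1), repeat=3):
--             f2 = n - (s1 + f1 + s2)
--             if f2 < 0:
--                 continue
--             states[s_left].append((1 + s1, 1 + f1, 1 + s2, 1 + f2))
--     return states
-- ===== SOURCE B (Python) =====
-- def states_by_steps_left(T: int):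
--     # Build each bucket directly with bounded loops (no discarded tuples),
--     # iterating n downward so bucket index s_left = T - n comes out in place.
--     return [
--         [(1 + s1, 1 + f1, 1 + s2, 1 + n - s1 - f1 - s2)
--          for s1 in range(n + 1)
--          for f1 in range(n - s1 + 1)
--          for s2 in range(n - s1 - f1 + 1)]
--         for n in range(T, -1, -1)
--     ]
-- ===== Notes on version B (the rewrite author's own statement) =====
-- stated objective: alternative
-- what changed: Replaces A's guarded cube scan (all (n+1)^3 triples with a discard test, appended by mutating per-bucket lists) with a direct nested comprehension that enumerates only the valid compositions (bounded inner ranges, no discarded tuples), building each bucket in place by iterating n downward.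
import Mathlib
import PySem

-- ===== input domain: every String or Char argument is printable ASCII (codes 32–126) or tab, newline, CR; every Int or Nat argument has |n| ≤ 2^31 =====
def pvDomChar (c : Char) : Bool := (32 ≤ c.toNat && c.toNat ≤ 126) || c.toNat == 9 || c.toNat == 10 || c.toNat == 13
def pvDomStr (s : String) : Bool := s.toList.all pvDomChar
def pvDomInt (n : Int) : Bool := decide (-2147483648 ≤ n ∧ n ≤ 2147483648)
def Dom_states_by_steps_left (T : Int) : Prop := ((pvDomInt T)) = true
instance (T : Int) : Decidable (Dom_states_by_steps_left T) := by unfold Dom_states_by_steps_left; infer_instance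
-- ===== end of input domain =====

-- B replaces A's guarded cube scan (mutating per-bucket lists) by a direct nested
-- comprehension over exactly the valid compositions (bounded inner ranges, no
-- discarded tuples), building each bucket in place by iterating n downward.

-- ===== PORT A =====
-- states[s_left].append(v): s_left = T - n is always a nonnegative in-range index here,
-- so List.modify at i.toNat is exact.
def pyAppendAt {α : Type} (st : List (List α)) (i : Int) (v : α) : List (List α) :=
  st.modify i.toNat (fun g => g ++ [v])

-- itertools.product(range(n+1), repeat=3) in lexicographic order = three nested loops
def states_by_steps_left (T : Int) : List (List (Int × Int × Int × Int)) :=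
  let states : List (List (Int × Int × Int × Int)) :=
    (PySem.List.pyRange 0 (T + 1) 1).map (fun _ => [])
  (PySem.List.pyRange 0 (T + 1) 1).foldl (fun states n =>
    let s_left := T - n
    (PySem.List.pyRange 0 (n + 1) 1).foldl (fun states s1 =>
      (PySem.List.pyRange 0 (n + 1) 1).foldl (fun states f1 =>
        (PySem.List.pyRange 0 (n + 1) 1).foldl (fun states s2 =>
          let f2 := n - (s1 + f1 + s2)
          if f2 < 0 then states
          else pyAppendAt states s_left (1 + s1, 1 + f1, 1 + s2, 1 + f2)) states) states) states)
    states

-- ===== PORT B =====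
def states_by_steps_left_alt (T : Int) : List (List (Int × Int × Int × Int)) :=
  (PySem.List.pyRange T (-1) (-1)).map (fun n =>
    (PySem.List.pyRange 0 (n + 1) 1).flatMap (fun s1 =>
      (PySem.List.pyRange 0 (n - s1 + 1) 1).flatMap (fun f1 =>
        (PySem.List.pyRange 0 (n - s1 - f1 + 1) 1).map (fun s2 =>
          (1 + s1, 1 + f1, 1 + s2, 1 + n - s1 - f1 - s2)))))

-- ===== PRECONDITION & SPEC =====
def Spec_states_by_steps_left (T : Int) (out : List (List (Int × Int × Int × Int))) : Prop := out = states_by_steps_left_alt T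
instance (T : Int) (out : List (List (Int × Int × Int × Int))) : Decidable (Spec_states_by_steps_left T out) := by unfold Spec_states_by_steps_left; infer_instance

-- ===== CLAIM (what is proved, stated in full; the proofs are below) =====
def Claim_equal_states_by_steps_left : Prop := ∀ (T : Int), Dom_states_by_steps_left T → Spec_states_by_steps_left T (states_by_steps_left T)

-- ===== LEMMAS AND PROOFS =====

-- B's inner comprehension for one bucket, as a function of n
def pvGroup (n : Int) : List (Int × Int × Int × Int) :=
  (PySem.List.pyRange 0 (n + 1) 1).flatMap (fun s1 =>
    (PySem.List.pyRange 0 (n - s1 + 1) 1).flatMap (fun f1 =>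
      (PySem.List.pyRange 0 (n - s1 - f1 + 1) 1).map (fun s2 =>
        (1 + s1, 1 + f1, 1 + s2, 1 + n - s1 - f1 - s2))))

theorem modify_append_left {α : Type} (xs ys : List α) (i : Nat) (f : α → α) (h : i < xs.length) :
    (xs ++ ys).modify i f = xs.modify i f ++ ys := by
  induction xs generalizing i with
  | nil => simp at h
  | cons a t ih =>
    cases i with
    | zero => simp [List.modify_zero_cons]
    | succ j =>
      simp only [List.cons_append, List.modify_succ_cons]
      rw [ih]
      simpa using h

theorem modify_last {α : Type} (xs : List α) (y : α) (f : α → α) :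
    (xs ++ [y]).modify xs.length f = xs ++ [f y] := by
  induction xs with
  | nil => simp [List.modify_zero_cons]
  | cons a t ih => simp [List.modify_succ_cons, ih]

-- innermost loop: guarded appends into bucket j accumulate the filtered map
theorem foldl_guard_appendAt {α β : Type} (l : List β) (st : List (List α)) (j : Nat)
    (p : β → Prop) [DecidablePred p] (f : β → α) :
    l.foldl (fun st x => if p x then st else st.modify j (fun g => g ++ [f x])) st
      = st.modify j (fun g => g ++ ((l.filter (fun x => !decide (p x))).map f)) := by
  induction l generalizing st with
  | nil =>
    simp only [List.foldl_nil, List.filter_nil, List.map_nil, List.append_nil]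
    exact (List.modify_id j st).symm
  | cons a t ih =>
    simp only [List.foldl_cons]
    by_cases h : p a
    · rw [if_pos h, ih, List.filter_cons_of_neg (by simp [h])]
    · rw [if_neg h, ih, List.modify_modify_eq, List.filter_cons_of_pos (by simp [h]),
        List.map_cons]
      congr 1; funext g; simp [Function.comp]

-- middle loops: folds of bucket-appends accumulate the flatMap
theorem foldl_flat_appendAt {α β : Type} (l : List β) (st : List (List α)) (j : Nat)
    (g : β → List α) :
    l.foldl (fun st x => st.modify j (fun b => b ++ g x)) st
      = st.modify j (fun b => b ++ l.flatMap g) := by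
  induction l generalizing st with
  | nil =>
    simp only [List.foldl_nil, List.flatMap_nil, List.append_nil]
    exact (List.modify_id j st).symm
  | cons a t ih =>
    simp only [List.foldl_cons, ih, List.modify_modify_eq, List.flatMap_cons]
    congr 1; funext b; simp [Function.comp]

-- a fold of in-prefix modifies never touches an appended last element
theorem foldl_modify_append_last {α β : Type} (l : List β) (xs : List (List α)) (y : List α)
    (idx : β → Nat) (f : β → List α → List α) (h : ∀ x ∈ l, idx x < xs.length) :
    l.foldl (fun st x => st.modify (idx x) (f x)) (xs ++ [y])
      = l.foldl (fun st x => st.modify (idx x) (f x)) xs ++ [y] := by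
  induction l generalizing xs with
  | nil => simp
  | cons a t ih =>
    simp only [List.foldl_cons]
    rw [modify_append_left _ _ _ _ (h a (by simp)), ih]
    intro x hx
    simpa using h x (by simp [hx])

-- the outer loop: modifying bucket t - k once per k builds the reversed map
theorem foldl_modify_build {α : Type} (t : Nat) (g : Nat → List α) :
    (List.range (t + 1)).foldl (fun st k => st.modify (t - k) (fun b => b ++ g k))
        (List.replicate (t + 1) ([] : List α))
      = (List.range (t + 1)).map (fun i => g (t - i)) := by
  induction t generalizing g with
  | zero => simp [List.modify_zero_cons]
  | succ t ih =>
    have hL : (List.range (t + 1 + 1)).foldl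
        (fun st k => st.modify (t + 1 - k) (fun b => b ++ g k))
        (List.replicate (t + 1 + 1) ([] : List α))
        = (List.range (t + 1)).map (fun i => g (t - i + 1)) ++ [g 0] := by
      rw [List.range_succ_eq_map, List.foldl_cons, List.foldl_map, Nat.sub_zero,
        List.replicate_succ' (n := t + 1)]
      have hml := modify_last (List.replicate (t + 1) ([] : List α)) ([] : List α)
        (fun b => b ++ g 0)
      rw [List.length_replicate] at hml
      rw [hml, List.nil_append]
      rw [foldl_modify_append_last (List.range (t + 1)) _ (g 0)
        (fun k => t + 1 - k.succ) (fun k b => b ++ g k.succ)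
        (by intro x hx; simp only [List.length_replicate]; omega)]
      congr 1
      rw [PySem.List.foldl_congr_mem _ _
        (fun (st : List (List α)) (k : Nat) => st.modify (t - k) (fun b => b ++ g (k + 1))) _
        (by intro st k _; simp [Nat.succ_sub_succ])]
      exact ih (fun m => g (m + 1))
    rw [hL]
    conv_rhs => rw [List.range_succ, List.map_append]
    simp only [List.map_singleton, Nat.sub_self]
    congr 1
    apply List.map_congr_left
    intro i hi
    simp only [List.mem_range] at hi
    congr 1
    omega

-- filter of the cube range by the guard is exactly the bounded range
theorem filter_range_guard (n s1 f1 : Int) (hs1 : 0 ≤ s1) (hf1 : 0 ≤ f1) (hle : s1 + f1 ≤ n) :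
    (PySem.List.pyRange 0 (n + 1) 1).filter (fun s2 => !decide (n - (s1 + f1 + s2) < 0))
      = PySem.List.pyRange 0 (n - s1 - f1 + 1) 1 := by
  rw [PySem.List.pyRange_one_append 0 (n - s1 - f1 + 1) (n + 1) (by omega) (by omega),
    List.filter_append]
  have h1 : (PySem.List.pyRange 0 (n - s1 - f1 + 1) 1).filter
      (fun s2 => !decide (n - (s1 + f1 + s2) < 0)) = PySem.List.pyRange 0 (n - s1 - f1 + 1) 1 := by
    apply List.filter_eq_self.mpr
    intro x hx
    rw [PySem.List.mem_pyRange_one] at hx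
    simp; omega
  have h2 : (PySem.List.pyRange (n - s1 - f1 + 1) (n + 1) 1).filter
      (fun s2 => !decide (n - (s1 + f1 + s2) < 0)) = [] := by
    apply List.filter_eq_nil_iff.mpr
    intro x hx
    rw [PySem.List.mem_pyRange_one] at hx
    simp; omega
  rw [h1, h2, List.append_nil]

-- a flatMap over a range whose tail contributes nothing shrinks to the head range
theorem flatMap_drop_tail {γ : Type} (a m b : Int) (F : Int → List γ) (h1 : a ≤ m) (h2 : m ≤ b)
    (hnil : ∀ x, m ≤ x → x < b → F x = []) :
    (PySem.List.pyRange a b 1).flatMap F = (PySem.List.pyRange a m 1).flatMap F := by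
  rw [PySem.List.pyRange_one_append a m b h1 h2, List.flatMap_append]
  have hz : (PySem.List.pyRange m b 1).flatMap F = [] := by
    apply List.flatMap_eq_nil_iff.mpr
    intro x hx
    rw [PySem.List.mem_pyRange_one] at hx
    exact hnil x hx.1 hx.2
  rw [hz, List.append_nil]

-- per-n: A's guarded cube produces exactly B's bucket pvGroup n
theorem cube_eq_group (n : Int) :
    (PySem.List.pyRange 0 (n + 1) 1).flatMap (fun s1 =>
      (PySem.List.pyRange 0 (n + 1) 1).flatMap (fun f1 =>
        ((PySem.List.pyRange 0 (n + 1) 1).filter (fun s2 => !decide (n - (s1 + f1 + s2) < 0))).map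
          (fun s2 => (1 + s1, 1 + f1, 1 + s2, 1 + (n - (s1 + f1 + s2))))))
      = pvGroup n := by
  unfold pvGroup
  apply List.flatMap_congr
  intro s1 hs1
  rw [PySem.List.mem_pyRange_one] at hs1
  have htail : ∀ f1, n - s1 + 1 ≤ f1 → f1 < n + 1 →
      ((PySem.List.pyRange 0 (n + 1) 1).filter
          (fun s2 => !decide (n - (s1 + f1 + s2) < 0))).map
        (fun s2 => (1 + s1, 1 + f1, 1 + s2, 1 + (n - (s1 + f1 + s2)))) = [] := by
    intro f1 hm hb
    have hfil : (PySem.List.pyRange 0 (n + 1) 1).filter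
        (fun s2 => !decide (n - (s1 + f1 + s2) < 0)) = [] := by
      apply List.filter_eq_nil_iff.mpr
      intro x hx
      rw [PySem.List.mem_pyRange_one] at hx
      simp
      omega
    rw [hfil, List.map_nil]
  rw [flatMap_drop_tail 0 (n - s1 + 1) (n + 1) _ (by omega) (by omega) htail]
  apply List.flatMap_congr
  intro f1 hf1
  rw [PySem.List.mem_pyRange_one] at hf1
  rw [filter_range_guard n s1 f1 (by omega) (by omega) (by omega)]
  apply List.map_congr_left
  intro s2 _
  have h4 : 1 + (n - (s1 + f1 + s2)) = 1 + n - s1 - f1 - s2 := by ring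
  rw [h4]

-- ===== VERDICT (by name: the statement is the Claim_ definition above) =====
theorem states_by_steps_left_spec : Claim_equal_states_by_steps_left := by
  intro T _
  unfold Spec_states_by_steps_left
  simp only [states_by_steps_left, states_by_steps_left_alt]
  by_cases hT : T < 0
  · rw [PySem.List.pyRange_one_eq_nil (by omega), PySem.List.pyRange_neg_one_eq_nil (by omega)]
    simp
  · rw [not_lt] at hT
    -- each per-n body is one modify of bucket (T - n) by the guarded cube list
    have hbody : ∀ (st : List (List (Int × Int × Int × Int))) (n : Int),
        (PySem.List.pyRange 0 (n + 1) 1).foldl (fun states s1 =>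
          (PySem.List.pyRange 0 (n + 1) 1).foldl (fun states f1 =>
            (PySem.List.pyRange 0 (n + 1) 1).foldl (fun states s2 =>
              if n - (s1 + f1 + s2) < 0 then states
              else pyAppendAt states (T - n)
                (1 + s1, 1 + f1, 1 + s2, 1 + (n - (s1 + f1 + s2)))) states) states) st
        = st.modify (T - n).toNat (fun b => b ++
            (PySem.List.pyRange 0 (n + 1) 1).flatMap (fun s1 =>
              (PySem.List.pyRange 0 (n + 1) 1).flatMap (fun f1 =>
                ((PySem.List.pyRange 0 (n + 1) 1).filter
                    (fun s2 => !decide (n - (s1 + f1 + s2) < 0))).map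
                  (fun s2 => (1 + s1, 1 + f1, 1 + s2, 1 + (n - (s1 + f1 + s2))))))) := by
      intro st n
      have hin : ∀ (st : List (List (Int × Int × Int × Int))) (s1 f1 : Int),
          (PySem.List.pyRange 0 (n + 1) 1).foldl (fun states s2 =>
            if n - (s1 + f1 + s2) < 0 then states
            else pyAppendAt states (T - n)
              (1 + s1, 1 + f1, 1 + s2, 1 + (n - (s1 + f1 + s2)))) st
          = st.modify (T - n).toNat (fun b => b ++
              ((PySem.List.pyRange 0 (n + 1) 1).filter
                  (fun s2 => !decide (n - (s1 + f1 + s2) < 0))).map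
                (fun s2 => (1 + s1, 1 + f1, 1 + s2, 1 + (n - (s1 + f1 + s2))))) := by
        intro st s1 f1
        exact foldl_guard_appendAt _ st _ (fun s2 => n - (s1 + f1 + s2) < 0) _
      have hmid : ∀ (st : List (List (Int × Int × Int × Int))) (s1 : Int),
          (PySem.List.pyRange 0 (n + 1) 1).foldl (fun states f1 =>
            (PySem.List.pyRange 0 (n + 1) 1).foldl (fun states s2 =>
              if n - (s1 + f1 + s2) < 0 then states
              else pyAppendAt states (T - n)
                (1 + s1, 1 + f1, 1 + s2, 1 + (n - (s1 + f1 + s2)))) states) st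
          = st.modify (T - n).toNat (fun b => b ++
              (PySem.List.pyRange 0 (n + 1) 1).flatMap (fun f1 =>
                ((PySem.List.pyRange 0 (n + 1) 1).filter
                    (fun s2 => !decide (n - (s1 + f1 + s2) < 0))).map
                  (fun s2 => (1 + s1, 1 + f1, 1 + s2, 1 + (n - (s1 + f1 + s2)))))) := by
        intro st s1
        rw [PySem.List.foldl_congr_mem _ _ _ st (fun st f1 _ => hin st s1 f1)]
        exact foldl_flat_appendAt _ st _ _
      rw [PySem.List.foldl_congr_mem _ _ _ st (fun st s1 _ => hmid st s1)]
      exact foldl_flat_appendAt _ st _ _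
    rw [PySem.List.foldl_congr_mem _ _ _ _ (fun st n _ => hbody st n)]
    obtain ⟨t, rfl⟩ := Int.eq_ofNat_of_zero_le hT
    have harg1 : (((t : Int) + 1) - 0).toNat = t + 1 := by omega
    have harg2 : ((t : Int) - (-1)).toNat = t + 1 := by omega
    rw [PySem.List.pyRange_one 0 ((t : Int) + 1), harg1, PySem.List.pyRange_neg_one, harg2]
    rw [List.map_map, List.map_map, List.foldl_map]
    have hinit : (List.range (t + 1)).map
        ((fun _ => ([] : List (Int × Int × Int × Int))) ∘ (fun k : Nat => (0 : Int) + ↑k))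
        = List.replicate (t + 1) ([] : List (Int × Int × Int × Int)) := by
      simp [Function.comp_def, List.map_const']
    rw [hinit]
    rw [PySem.List.foldl_congr_mem _ _
      (fun (st : List (List (Int × Int × Int × Int))) (k : Nat) => st.modify (t - k)
        (fun b => b ++
          (PySem.List.pyRange 0 ((k : Int) + 1) 1).flatMap (fun s1 =>
            (PySem.List.pyRange 0 ((k : Int) + 1) 1).flatMap (fun f1 =>
              ((PySem.List.pyRange 0 ((k : Int) + 1) 1).filter
                  (fun s2 => !decide ((k : Int) - (s1 + f1 + s2) < 0))).map
                (fun s2 => (1 + s1, 1 + f1, 1 + s2, 1 + ((k : Int) - (s1 + f1 + s2)))))))) _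
      (by
        intro st k _
        have h1 : (0 : Int) + (k : Int) = (k : Int) := by omega
        have h2 : (((t : Int)) - ((k : Int))).toNat = t - k := by omega
        rw [h1, h2])]
    rw [foldl_modify_build t _]
    apply List.map_congr_left
    intro i hi
    simp only [List.mem_range] at hi
    rw [cube_eq_group ((t - i : Nat) : Int)]
    have hcast : (((t - i : Nat) : Int)) = (t : Int) - (i : Int) := by omega
    rw [hcast]
    unfold pvGroup
    rfl
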